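-- pv_equiv track=rewrite | github.com/WeizhenWang-1210/MetaVQA | question_generator.py | subclass
-- ===== SOURCE A (Python) =====
-- from collections import defaultdict
--
-- def subclass(class1:str, class2:str)->bool:
--     inheritance = get_inheritance()
--     if class1 == class2:
--         return True
--     result = False
--     for child in inheritance[class2]:
--         result = result or subclass(class1, child)
--     return result
--
-- def get_inheritance()->defaultdict:
--     inheritance = defaultdict(lambda:[])
--     inheritance["Vehicle"] = ["SUV", "Sedan", "Truck", "Sportscar","Jeep","Pickup","Compact Sedan"]
--     inheritance["Traffic Obstacle"] = ["Traffic Cone", "Warning sign", "Planar Barrier"]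
--     inheritance["Traffic Participant"] = ["Vehicle", "Pedestrian"]
--     return inheritance
-- ===== SOURCE B (Python) =====
-- def subclass(class1: str, class2: str) -> bool:
--     # The inheritance relation is a forest, so instead of searching downward
--     # from class2 we invert it into a parent map and walk UP from class1.
--     edges = {
--         "Vehicle": ["SUV", "Sedan", "Truck", "Sportscar", "Jeep", "Pickup", "Compact Sedan"],
--         "Traffic Obstacle": ["Traffic Cone", "Warning sign", "Planar Barrier"],
--         "Traffic Participant": ["Vehicle", "Pedestrian"],
--     }
--     parent = {child: p for p, children in edges.items() for child in children}
--     node = class1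
--     while node != class2:
--         if node not in parent:
--             return False
--         node = parent[node]
--     return True
-- ===== Notes on version B (the rewrite author's own statement) =====
-- stated objective: alternative
-- what changed: Instead of A's top-down recursive search from class2 over the children lists (rebuilding the dict each call), B inverts the forest into a child-to-parent map once and iteratively walks the ancestor chain UP from class1 until it hits class2 or a root; correct because the inheritance relation is a forest, so class1 descends from class2 iff class2 lies on class1's unique ancestor chain.
import Mathlib
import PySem

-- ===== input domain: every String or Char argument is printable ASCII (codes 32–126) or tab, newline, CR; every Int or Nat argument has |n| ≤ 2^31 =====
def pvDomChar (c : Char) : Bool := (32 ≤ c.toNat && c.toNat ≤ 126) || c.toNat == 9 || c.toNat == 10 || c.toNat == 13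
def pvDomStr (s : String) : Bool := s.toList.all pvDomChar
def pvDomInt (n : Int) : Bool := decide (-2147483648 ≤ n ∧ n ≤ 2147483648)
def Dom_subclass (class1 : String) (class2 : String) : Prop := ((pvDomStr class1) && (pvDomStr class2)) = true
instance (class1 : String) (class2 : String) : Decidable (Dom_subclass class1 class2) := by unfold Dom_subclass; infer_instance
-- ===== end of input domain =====

-- B replaces A's top-down recursive search over children (rebuilding the inheritance dict
-- at every recursive call) by the opposite traversal: invert the forest into a parent map
-- once and walk UP the ancestor chain from class1 until class2 or a root; same value.

-- ===== PORT A =====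
-- get_inheritance(): a defaultdict with default []; lookups below use getD _ [].
def getInheritance : PySem.Dict String (List String) :=
  (((PySem.Dict.empty : PySem.Dict String (List String)).insert "Vehicle"
      ["SUV", "Sedan", "Truck", "Sportscar", "Jeep", "Pickup", "Compact Sedan"]).insert
    "Traffic Obstacle" ["Traffic Cone", "Warning sign", "Planar Barrier"]).insert
    "Traffic Participant" ["Vehicle", "Pedestrian"]

-- A's recursion, with a fuel counter as a pure totality guard: the inheritance graph has
-- depth < 4, so the fuel-0 branch is never taken on the calls `subclass` makes.
def subclassFuel : Nat → String → String → Bool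
  | 0, _, _ => false
  | n + 1, class1, class2 =>
    if class1 == class2 then true
    else
      (getInheritance.getD class2 []).foldl
        (fun result child => result || subclassFuel n class1 child) false

def subclass (class1 : String) (class2 : String) : Bool :=
  subclassFuel 4 class1 class2

-- ===== PORT B =====
-- Source B's dict literal `edges` and the comprehension inverting it into the parent map.
def edgesB : PySem.Dict String (List String) :=
  PySem.Dict.ofList
    [("Vehicle", ["SUV", "Sedan", "Truck", "Sportscar", "Jeep", "Pickup", "Compact Sedan"]),
     ("Traffic Obstacle", ["Traffic Cone", "Warning sign", "Planar Barrier"]),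
     ("Traffic Participant", ["Vehicle", "Pedestrian"])]

def parentB : PySem.Dict String String :=
  edgesB.items.foldl
    (fun d pc => pc.2.foldl (fun d c => d.insert c pc.1) d) PySem.Dict.empty

-- Source B's while-loop: stop with True when node == class2, with False at a root
-- ('node not in parent' + 'parent[node]' = one match on get?), else climb to the parent.
-- An ancestor chain has ≤ 3 hops, so fuel 4 is a pure totality guard, never exhausted.
def goUp : Nat → String → String → Bool
  | 0, _, _ => false
  | n + 1, node, class2 =>
    if node == class2 then true
    else
      match parentB.get? node with
      | none => false
      | some p => goUp n p class2

def subclass_alt (class1 : String) (class2 : String) : Bool :=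
  goUp 4 class1 class2

-- ===== PRECONDITION & SPEC =====
def Spec_subclass (class1 : String) (class2 : String) (out : Bool) : Prop := out = subclass_alt class1 class2
instance (class1 : String) (class2 : String) (out : Bool) : Decidable (Spec_subclass class1 class2 out) := by unfold Spec_subclass; infer_instance

-- ===== CLAIM (what is proved, stated in full; the proofs are below) =====
def Claim_equal_subclass : Prop := ∀ (class1 : String) (class2 : String), Dom_subclass class1 class2 → Spec_subclass class1 class2 (subclass class1 class2)

-- ===== LEMMAS AND PROOFS =====

-- the 14 class names occurring in the inheritance graph
def classU : List String :=
  ["Vehicle", "SUV", "Sedan", "Truck", "Sportscar", "Jeep", "Pickup", "Compact Sedan",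
   "Traffic Obstacle", "Traffic Cone", "Warning sign", "Planar Barrier",
   "Traffic Participant", "Pedestrian"]

set_option maxHeartbeats 1000000 in
theorem pairs_ok : ∀ c1 ∈ classU, ∀ c2 ∈ classU, subclass c1 c2 = subclass_alt c1 c2 := by
  decide

-- getInheritance on the three internal nodes and the leaves
theorem inh_V : getInheritance.getD "Vehicle" [] = ["SUV", "Sedan", "Truck", "Sportscar", "Jeep", "Pickup", "Compact Sedan"] := by decide
theorem inh_O : getInheritance.getD "Traffic Obstacle" [] = ["Traffic Cone", "Warning sign", "Planar Barrier"] := by decide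
theorem inh_TP : getInheritance.getD "Traffic Participant" [] = ["Vehicle", "Pedestrian"] := by decide
theorem inh_leaf : ∀ k ∈ ["SUV", "Sedan", "Truck", "Sportscar", "Jeep", "Pickup",
    "Compact Sedan", "Traffic Cone", "Warning sign", "Planar Barrier", "Pedestrian"],
    getInheritance.getD k [] = [] := by decide

theorem inh_other (c2 : String) (hV : ¬ c2 = "Vehicle") (hO : ¬ c2 = "Traffic Obstacle")
    (hTP : ¬ c2 = "Traffic Participant") : getInheritance.getD c2 [] = [] := by
  simp [getInheritance, PySem.Dict.getD_insert, PySem.Dict.getD_empty, hV, hO, hTP]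

-- parentB on its 12 keys and on the two roots
theorem pSUV : parentB.get? "SUV" = some "Vehicle" := by decide
theorem pSed : parentB.get? "Sedan" = some "Vehicle" := by decide
theorem pTru : parentB.get? "Truck" = some "Vehicle" := by decide
theorem pSpo : parentB.get? "Sportscar" = some "Vehicle" := by decide
theorem pJee : parentB.get? "Jeep" = some "Vehicle" := by decide
theorem pPic : parentB.get? "Pickup" = some "Vehicle" := by decide
theorem pCom : parentB.get? "Compact Sedan" = some "Vehicle" := by decide
theorem pCon : parentB.get? "Traffic Cone" = some "Traffic Obstacle" := by decide
theorem pWar : parentB.get? "Warning sign" = some "Traffic Obstacle" := by decide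
theorem pBar : parentB.get? "Planar Barrier" = some "Traffic Obstacle" := by decide
theorem pVeh : parentB.get? "Vehicle" = some "Traffic Participant" := by decide
theorem pPed : parentB.get? "Pedestrian" = some "Traffic Participant" := by decide
theorem pTPr : parentB.get? "Traffic Participant" = none := by decide
theorem pObs : parentB.get? "Traffic Obstacle" = none := by decide

-- a name outside classU is not a key of parentB
theorem parent_none (c1 : String) (h : c1 ∉ classU) : parentB.get? c1 = none := by
  simp only [classU, List.mem_cons, List.not_mem_nil, or_false] at h
  push Not at h
  obtain ⟨n1, n2, n3, n4, n5, n6, n7, n8, n9, n10, n11, n12, n13, n14⟩ := h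
  rw [show parentB = PySem.Dict.mk
    [("SUV", "Vehicle"), ("Sedan", "Vehicle"), ("Truck", "Vehicle"), ("Sportscar", "Vehicle"),
     ("Jeep", "Vehicle"), ("Pickup", "Vehicle"), ("Compact Sedan", "Vehicle"),
     ("Traffic Cone", "Traffic Obstacle"), ("Warning sign", "Traffic Obstacle"),
     ("Planar Barrier", "Traffic Obstacle"), ("Vehicle", "Traffic Participant"),
     ("Pedestrian", "Traffic Participant")] from rfl]
  simp [beq_iff_eq, Ne.symm n1, Ne.symm n2, Ne.symm n3, Ne.symm n4, Ne.symm n5, Ne.symm n6,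
    Ne.symm n7, Ne.symm n8, Ne.symm n10, Ne.symm n11, Ne.symm n12, Ne.symm n14,
    PySem.Dict.get?]

-- B on a name outside the graph: the loop stops at once, so alt = (c1 == c2)
theorem alt_other (c1 c2 : String) (h : c1 ∉ classU) : subclass_alt c1 c2 = (c1 == c2) := by
  cases hb : c1 == c2 <;> simp [subclass_alt, goUp, hb, parent_none c1 h]

-- A on a name outside the graph: no child ever equals c1, so A = (c1 == c2)
theorem A_other (c1 c2 : String) (h : c1 ∉ classU) : subclass c1 c2 = (c1 == c2) := by
  simp only [classU, List.mem_cons, List.not_mem_nil, or_false] at h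
  push Not at h
  obtain ⟨n1, n2, n3, n4, n5, n6, n7, n8, n9, n10, n11, n12, n13, n14⟩ := h
  by_cases hV : c2 = "Vehicle"
  · subst hV
    simp [subclass, subclassFuel, inh_V, inh_leaf, n1, n2, n3, n4, n5, n6, n7, n8]
  by_cases hO : c2 = "Traffic Obstacle"
  · subst hO
    simp [subclass, subclassFuel, inh_O, inh_leaf, n9, n10, n11, n12]
  by_cases hTP : c2 = "Traffic Participant"
  · subst hTP
    simp [subclass, subclassFuel, inh_TP, inh_V, inh_leaf,
      n1, n2, n3, n4, n5, n6, n7, n8, n13, n14]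
  · cases hb : c1 == c2 <;>
      simp [subclass, subclassFuel, inh_other c2 hV hO hTP, hb]

-- A when c2 is outside the graph's three internal nodes: the child list is empty
theorem A_leaf (c1 c2 : String) (hV : ¬ c2 = "Vehicle") (hO : ¬ c2 = "Traffic Obstacle")
    (hTP : ¬ c2 = "Traffic Participant") : subclass c1 c2 = (c1 == c2) := by
  cases hb : c1 == c2 <;> simp [subclass, subclassFuel, inh_other c2 hV hO hTP, hb]

-- B when c1 is in the graph but c2 is not: the climb never meets c2 and ends at a root
theorem alt_false (c1 c2 : String) (h1 : c1 ∈ classU) (h2 : c2 ∉ classU) :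
    subclass_alt c1 c2 = false := by
  simp only [classU, List.mem_cons, List.not_mem_nil, or_false] at h1 h2
  push Not at h2
  obtain ⟨n1, n2, n3, n4, n5, n6, n7, n8, n9, n10, n11, n12, n13, n14⟩ := h2
  rcases h1 with h | h | h | h | h | h | h | h | h | h | h | h | h | h <;> subst h <;>
    simp [subclass_alt, goUp, beq_iff_eq, Ne.symm n1, Ne.symm n2, Ne.symm n3, Ne.symm n4,
      Ne.symm n5, Ne.symm n6, Ne.symm n7, Ne.symm n8, Ne.symm n9, Ne.symm n10, Ne.symm n11,
      Ne.symm n12, Ne.symm n13, Ne.symm n14, pSUV, pSed, pTru, pSpo, pJee, pPic, pCom,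
      pCon, pWar, pBar, pVeh, pPed, pTPr, pObs]

theorem subclass_eq_alt (c1 c2 : String) : subclass c1 c2 = subclass_alt c1 c2 := by
  by_cases h1 : c1 ∈ classU
  · by_cases h2 : c2 ∈ classU
    · exact pairs_ok c1 h1 c2 h2
    · have hV : ¬ c2 = "Vehicle" := fun e => h2 (by rw [e]; decide)
      have hO : ¬ c2 = "Traffic Obstacle" := fun e => h2 (by rw [e]; decide)
      have hTP : ¬ c2 = "Traffic Participant" := fun e => h2 (by rw [e]; decide)
      rw [A_leaf c1 c2 hV hO hTP, alt_false c1 c2 h1 h2]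
      cases hb : c1 == c2
      · rfl
      · exact absurd (eq_of_beq hb ▸ h1) h2
  · rw [A_other c1 c2 h1, alt_other c1 c2 h1]

-- ===== VERDICT (by name: the statement is the Claim_ definition above) =====
theorem subclass_spec : Claim_equal_subclass := by
  intro class1 class2 _
  exact subclass_eq_alt class1 class2
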